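-- pv_equiv track=rewrite | github.com/Hondarer/pub_markdown | bin/md_style_jp.py | _replace_skip_existing
-- ===== SOURCE A (Python) =====
-- def _replace_skip_existing(text: str, from_word: str, to_word: str) -> str:
--     """from_word を to_word に正規化する。既に to_word の位置はそのまま通す。"""
--     if from_word == to_word:
--         return text
--     result = []
--     i = 0
--     flen = len(from_word)
--     tlen = len(to_word)
--     while i < len(text):
--         if flen >= tlen:
--             if text[i:i + flen] == from_word:
--                 result.append(to_word)
--                 i += flen
--                 continue
--             if text[i:i + tlen] == to_word:
--                 # すでに標準形がある位置はそのまま通過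
--                 result.append(to_word)
--                 i += tlen
--                 continue
--         else:
--             if text[i:i + tlen] == to_word:
--                 # すでに標準形がある位置はそのまま通過
--                 result.append(to_word)
--                 i += tlen
--                 continue
--             if text[i:i + flen] == from_word:
--                 result.append(to_word)
--                 i += flen
--                 continue
--         result.append(text[i])
--         i += 1
--     return "".join(result)
-- ===== SOURCE B (Python) =====
-- def _replace_skip_existing(text: str, from_word: str, to_word: str) -> str:
--     """from_word を to_word に正規化する。既に to_word の位置はそのまま通す。
--
--     Jump-based rewrite: instead of testing every index, str.find locates the
--     next occurrence of either word (priority word first on ties), the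
--     untouched chunk is copied wholesale, and the scan resumes after the match.
--     """
--     if from_word == to_word:
--         return text
--     if len(from_word) >= len(to_word):
--         first, second = from_word, to_word
--     else:
--         first, second = to_word, from_word
--     out = []
--     rest = text
--     while True:
--         p1 = rest.find(first)
--         p2 = rest.find(second)
--         if p1 == -1 and p2 == -1:
--             out.append(rest)
--             break
--         if p1 != -1 and (p2 == -1 or p1 <= p2):
--             pos, step = p1, len(first)
--         else:
--             pos, step = p2, len(second)
--         out.append(rest[:pos])
--         out.append(to_word)
--         rest = rest[pos + step:]
--     return "".join(out)
-- ===== Notes on version B (the rewrite author's own statement) =====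
-- stated objective: faster
-- what changed: B replaces A's per-index while loop (which tests a slice comparison at every character position) by a str.find-driven jump scan: each iteration locates the next occurrence of either word with two find calls (priority word winning ties), copies the untouched chunk wholesale and resumes after the match.
-- outside the precondition, e.g. on _replace_skip_existing('', 'ab', ''): A returns '', B does not finish within the time limit; on _replace_skip_existing('abab', 'ab', ''): A returns '', B does not finish within the time limit; on _replace_skip_existing('', '', 'x'): A returns '', B does not finish within the time limit
import Mathlib
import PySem

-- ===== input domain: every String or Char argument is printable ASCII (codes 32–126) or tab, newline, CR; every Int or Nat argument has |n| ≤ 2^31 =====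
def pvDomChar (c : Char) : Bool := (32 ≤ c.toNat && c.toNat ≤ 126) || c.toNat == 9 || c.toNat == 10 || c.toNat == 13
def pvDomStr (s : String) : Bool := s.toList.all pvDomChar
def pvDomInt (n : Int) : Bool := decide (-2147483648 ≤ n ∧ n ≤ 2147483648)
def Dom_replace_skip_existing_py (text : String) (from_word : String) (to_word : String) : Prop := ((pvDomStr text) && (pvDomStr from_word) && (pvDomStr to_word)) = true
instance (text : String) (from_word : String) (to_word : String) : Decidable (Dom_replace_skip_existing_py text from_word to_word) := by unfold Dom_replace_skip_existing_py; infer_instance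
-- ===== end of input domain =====

-- B replaces A's per-index scan by a find-driven jump scan (str.find locates the
-- next occurrence of either word, the untouched chunk is copied wholesale);
-- equivalence of the RETURN value is proved on Pre_ (both words nonempty or equal).

-- ===== PORT A =====
-- A's while loop over index i, one fuel unit per iteration (fuel = len(text)
-- suffices on Pre_, where every iteration advances i by at least 1).
def pyAGo (t fw tw : List Char) : Nat → Nat → List Char
  | _, 0 => []
  | i, fuel+1 =>
    if h : i < t.length then
      if tw.length ≤ fw.length then
        -- text[i:i+flen] == from_word / text[i:i+tlen] == to_word
        if PySem.List.slice t (some (i : Int)) (some ((i : Int) + (fw.length : Int))) = fw then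
          tw ++ pyAGo t fw tw (i + fw.length) fuel
        else if PySem.List.slice t (some (i : Int)) (some ((i : Int) + (tw.length : Int))) = tw then
          tw ++ pyAGo t fw tw (i + tw.length) fuel
        else t[i] :: pyAGo t fw tw (i + 1) fuel
      else
        if PySem.List.slice t (some (i : Int)) (some ((i : Int) + (tw.length : Int))) = tw then
          tw ++ pyAGo t fw tw (i + tw.length) fuel
        else if PySem.List.slice t (some (i : Int)) (some ((i : Int) + (fw.length : Int))) = fw then
          tw ++ pyAGo t fw tw (i + fw.length) fuel
        else t[i] :: pyAGo t fw tw (i + 1) fuel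
    else []

def replace_skip_existing_py (text : String) (from_word : String) (to_word : String) : String :=
  if from_word = to_word then text
  else String.ofList (pyAGo text.toList from_word.toList to_word.toList 0 text.toList.length)

-- ===== PORT B =====
-- B's while True loop; rest[:pos] / rest[pos+step:] with pos, step ≥ 0 are
-- take / drop (exact for nonnegative slice bounds); fuel = len(text)+1 covers
-- every iteration on Pre_ (each non-final iteration consumes ≥ 1 character).
def pyBGo (first second tw : List Char) : Nat → List Char → List Char
  | 0, _ => []
  | fuel+1, rest =>
    let p1 := PySem.Chars.find rest first
    let p2 := PySem.Chars.find rest second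
    if p1 = -1 ∧ p2 = -1 then rest
    else
      let ps : Nat × Nat :=
        if p1 ≠ -1 ∧ (p2 = -1 ∨ p1 ≤ p2) then (p1.toNat, first.length) else (p2.toNat, second.length)
      rest.take ps.1 ++ tw ++ pyBGo first second tw fuel (rest.drop (ps.1 + ps.2))

def replace_skip_existing_py_alt (text : String) (from_word : String) (to_word : String) : String :=
  if from_word = to_word then text
  else
    if to_word.toList.length ≤ from_word.toList.length then
      String.ofList (pyBGo from_word.toList to_word.toList to_word.toList (text.toList.length + 1) text.toList)
    else
      String.ofList (pyBGo to_word.toList from_word.toList to_word.toList (text.toList.length + 1) text.toList)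

-- ===== PRECONDITION & SPEC =====
-- Pre_ excludes the degenerate inputs where from_word or to_word is empty while
-- the two words differ: there an empty-slice match never advances A's index, so
-- A's loop diverges except in corner cases where the nonempty word (or empty
-- text) consumes the whole input, and B's find-jump loop diverges on all of them.
def Pre_replace_skip_existing_py (text : String) (from_word : String) (to_word : String) : Prop :=
  from_word = to_word ∨ (from_word ≠ "" ∧ to_word ≠ "")
instance (text : String) (from_word : String) (to_word : String) : Decidable (Pre_replace_skip_existing_py text from_word to_word) := by unfold Pre_replace_skip_existing_py; infer_instance

def pvWitness_replace_skip_existing_py : String × String × String := ("colour and color", "colour", "color")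

def Spec_replace_skip_existing_py (text : String) (from_word : String) (to_word : String) (out : String) : Prop := out = replace_skip_existing_py_alt text from_word to_word
instance (text : String) (from_word : String) (to_word : String) (out : String) : Decidable (Spec_replace_skip_existing_py text from_word to_word out) := by unfold Spec_replace_skip_existing_py; infer_instance

-- ===== CLAIM (what is proved, stated in full; the proofs are below) =====
def Claim_equal_replace_skip_existing_py : Prop := ∀ (text : String) (from_word : String) (to_word : String), Dom_replace_skip_existing_py text from_word to_word → Pre_replace_skip_existing_py text from_word to_word → Spec_replace_skip_existing_py text from_word to_word (replace_skip_existing_py text from_word to_word)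

-- ===== LEMMAS AND PROOFS =====

-- A's loop rewritten on the remaining suffix, priority word first.
def specGo (first second tw : List Char) : Nat → List Char → List Char
  | 0, _ => []
  | _, [] => []
  | fuel+1, c :: rest =>
    if first <+: c :: rest then tw ++ specGo first second tw fuel ((c :: rest).drop first.length)
    else if second <+: c :: rest then tw ++ specGo first second tw fuel ((c :: rest).drop second.length)
    else c :: specGo first second tw fuel rest

theorem prefix_drop_infix {sub s : List Char} (j : Nat) (h : sub <+: s.drop j) : sub <:+: s :=
  h.isInfix.trans (s.drop_suffix j).isInfix

theorem slice_eq_iff_prefix (t w : List Char) (i : Nat) :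
    (PySem.List.slice t (some (i : Int)) (some ((i : Int) + (w.length : Int))) = w) ↔ w <+: t.drop i := by
  rw [PySem.List.slice_natCast_add, eq_comm, ← List.prefix_iff_eq_take]

-- A(index form) = spec(suffix form)
theorem pyAGo_eq_specGo (t fw tw : List Char) :
    ∀ fuel i, pyAGo t fw tw i fuel =
      (if tw.length ≤ fw.length then specGo fw tw tw fuel (t.drop i)
       else specGo tw fw tw fuel (t.drop i)) := by
  intro fuel
  induction fuel with
  | zero => intro i; simp only [pyAGo, specGo]; split <;> rfl
  | succ f ih =>
    intro i
    by_cases h : i < t.length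
    · have hd : t.drop i = t[i] :: t.drop (i + 1) := List.drop_eq_getElem_cons h
      have hdw : ∀ w : List Char, (t.drop i).drop w.length = t.drop (i + w.length) := by
        intro w; rw [List.drop_drop]
      by_cases hlen : tw.length ≤ fw.length
      · rw [if_pos hlen]
        simp only [pyAGo, dif_pos h, if_pos hlen]
        rw [hd]
        by_cases h1 : fw <+: t.drop i
        · rw [if_pos ((slice_eq_iff_prefix t fw i).mpr h1), specGo, if_pos (hd ▸ h1)]
          rw [ih (i + fw.length), if_pos hlen, ← hd, hdw]
        · rw [if_neg (fun hc => h1 ((slice_eq_iff_prefix t fw i).mp hc)), specGo,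
              if_neg (fun hc => h1 (hd ▸ hc))]
          by_cases h2 : tw <+: t.drop i
          · rw [if_pos ((slice_eq_iff_prefix t tw i).mpr h2), if_pos (hd ▸ h2)]
            rw [ih (i + tw.length), if_pos hlen, ← hd, hdw]
          · rw [if_neg (fun hc => h2 ((slice_eq_iff_prefix t tw i).mp hc)),
                if_neg (fun hc => h2 (hd ▸ hc))]
            rw [ih (i + 1), if_pos hlen]
      · rw [if_neg hlen]
        simp only [pyAGo, dif_pos h, if_neg hlen]
        rw [hd]
        by_cases h1 : tw <+: t.drop i
        · rw [if_pos ((slice_eq_iff_prefix t tw i).mpr h1), specGo, if_pos (hd ▸ h1)]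
          rw [ih (i + tw.length), if_neg hlen, ← hd, hdw]
        · rw [if_neg (fun hc => h1 ((slice_eq_iff_prefix t tw i).mp hc)), specGo,
              if_neg (fun hc => h1 (hd ▸ hc))]
          by_cases h2 : fw <+: t.drop i
          · rw [if_pos ((slice_eq_iff_prefix t fw i).mpr h2), if_pos (hd ▸ h2)]
            rw [ih (i + fw.length), if_neg hlen, ← hd, hdw]
          · rw [if_neg (fun hc => h2 ((slice_eq_iff_prefix t fw i).mp hc)),
                if_neg (fun hc => h2 (hd ▸ hc))]
            rw [ih (i + 1), if_neg hlen]
    · have hd : t.drop i = [] := List.drop_eq_nil_of_le (by omega)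
      simp only [pyAGo, dif_neg h, hd]
      split <;> (cases f <;> rfl)

-- copying phase: no match of either word before position pos
theorem specGo_copy (first second tw : List Char) :
    ∀ (pos : Nat) (s : List Char) (fuel : Nat), pos ≤ s.length → s.length ≤ fuel →
      (∀ j < pos, ¬ first <+: s.drop j) → (∀ j < pos, ¬ second <+: s.drop j) →
      specGo first second tw fuel s = s.take pos ++ specGo first second tw (fuel - pos) (s.drop pos) := by
  intro pos
  induction pos with
  | zero => intro s fuel _ _ _ _; simp
  | succ p ih =>
    intro s fuel hlen hfuel hn1 hn2
    match s, fuel with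
    | c :: rest, g + 1 =>
      have h1 : ¬ first <+: c :: rest := hn1 0 (by omega)
      have h2 : ¬ second <+: c :: rest := hn2 0 (by omega)
      rw [specGo, if_neg h1, if_neg h2]
      rw [ih rest g (by simpa using hlen) (by simpa using hfuel)
          (fun j hj => hn1 (j + 1) (by omega)) (fun j hj => hn2 (j + 1) (by omega))]
      simp [Nat.succ_sub_succ]

-- scattered facts about find
theorem find_none_no_prefix {s sub : List Char} (h : PySem.Chars.find s sub = -1) :
    ∀ j, ¬ sub <+: s.drop j := fun j hp =>
  (PySem.Chars.find_eq_neg_one_iff s sub).mp h (prefix_drop_infix j hp)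

-- main bridge: spec = B's jump loop
theorem specGo_eq_pyBGo (first second tw : List Char)
    (hf : first ≠ []) (hs : second ≠ []) :
    ∀ n s fuelA fuelB, s.length ≤ n → s.length ≤ fuelA → s.length < fuelB →
      specGo first second tw fuelA s = pyBGo first second tw fuelB s := by
  intro n
  induction n with
  | zero =>
    intro s fuelA fuelB hn _ hB
    have hse : s = [] := List.eq_nil_of_length_eq_zero (by omega)
    subst hse
    match fuelB, hB with
    | fB + 1, _ =>
      have h1 : PySem.Chars.find [] first = -1 := by
        rw [PySem.Chars.find_eq_neg_one_iff]
        intro hinf; exact hf (List.eq_nil_of_infix_nil hinf)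
      have h2 : PySem.Chars.find [] second = -1 := by
        rw [PySem.Chars.find_eq_neg_one_iff]
        intro hinf; exact hs (List.eq_nil_of_infix_nil hinf)
      rw [pyBGo]
      simp only [h1, h2, and_self, if_pos]
      cases fuelA <;> rfl
  | succ n ih =>
    intro s fuelA fuelB hn hA hB
    match fuelB, hB with
    | fB + 1, _ =>
      rw [pyBGo]
      by_cases hboth : PySem.Chars.find s first = -1 ∧ PySem.Chars.find s second = -1
      · rw [if_pos hboth]
        rw [specGo_copy first second tw s.length s fuelA le_rfl hA
            (fun j _ => find_none_no_prefix hboth.1 j) (fun j _ => find_none_no_prefix hboth.2 j)]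
        simp only [List.take_length, List.drop_length]
        cases (fuelA - s.length) <;> simp [specGo]
      · rw [if_neg hboth]
        -- the selected (pos, step)
        by_cases hc : PySem.Chars.find s first ≠ -1 ∧
            (PySem.Chars.find s second = -1 ∨ PySem.Chars.find s first ≤ PySem.Chars.find s second)
        · -- priority word `first` matches first (or alone)
          simp only [if_pos hc]
          have hp1 : 0 ≤ PySem.Chars.find s first := by
            have := PySem.Chars.neg_one_le_find s first; omega
          obtain ⟨hpref, hmin⟩ := PySem.Chars.find_spec (s := s) (sub := first) hp1
          set pos := (PySem.Chars.find s first).toNat with hpos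
          have hnos : ∀ j < pos, ¬ second <+: s.drop j := by
            rcases hc.2 with h2 | hle
            · intro j _; exact find_none_no_prefix h2 j
            · have hp1 : 0 ≤ PySem.Chars.find s first := by
                have := PySem.Chars.neg_one_le_find s first; omega
              have hp2 : 0 ≤ PySem.Chars.find s second := le_trans hp1 hle
              obtain ⟨_, hmin2⟩ := PySem.Chars.find_spec (s := s) (sub := second) hp2
              intro j hj; exact hmin2 j (by omega)
          have hposlt : pos < s.length := by
            by_contra hge
            rw [List.drop_eq_nil_of_le (by omega)] at hpref
            exact hf (List.prefix_nil.mp hpref)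
          have hstep : 1 ≤ first.length := List.length_pos_of_ne_nil hf
          rw [specGo_copy first second tw pos s fuelA (by omega) hA hmin hnos]
          obtain ⟨g, hg⟩ : ∃ g, fuelA - pos = g + 1 := ⟨fuelA - pos - 1, by omega⟩
          obtain ⟨c, rest, hcr⟩ : ∃ c rest, s.drop pos = c :: rest := by
            rcases List.exists_cons_of_ne_nil (List.ne_nil_of_length_pos (l := s.drop pos) (by rw [List.length_drop]; omega)) with ⟨c, rest, h⟩
            exact ⟨c, rest, h⟩
          rw [hg, hcr, specGo, if_pos (hcr ▸ hpref), ← hcr, List.drop_drop]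
          have hlen' : (s.drop (pos + first.length)).length ≤ n := by rw [List.length_drop]; omega
          have hq0 : (s.drop (pos + first.length)).length = s.length - (pos + first.length) := by rw [List.length_drop]
          have hq1 : (s.drop (pos + first.length)).length ≤ g := by omega
          have hq2 : (s.drop (pos + first.length)).length < fB := by omega
          rw [ih (s.drop (pos + first.length)) g fB hlen' hq1 hq2]
          simp [List.append_assoc]
        · -- `second` matches strictly first
          simp only [if_neg hc]
          have hp2ne : PySem.Chars.find s second ≠ -1 := by tauto
          have hp2 : 0 ≤ PySem.Chars.find s second := by
            have := PySem.Chars.neg_one_le_find s second; omega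
          obtain ⟨hpref, hmin⟩ := PySem.Chars.find_spec (s := s) (sub := second) hp2
          set pos := (PySem.Chars.find s second).toNat with hpos
          have hnof : ∀ j ≤ pos, ¬ first <+: s.drop j := by
            by_cases h1 : PySem.Chars.find s first = -1
            · intro j _; exact find_none_no_prefix h1 j
            · have hlt : PySem.Chars.find s second < PySem.Chars.find s first := by
                push_neg at hc; have := hc h1; omega
              have hp1 : 0 ≤ PySem.Chars.find s first := by
                have := PySem.Chars.neg_one_le_find s first; omega
              obtain ⟨_, hmin1⟩ := PySem.Chars.find_spec (s := s) (sub := first) hp1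
              intro j hj; exact hmin1 j (by omega)
          have hposlt : pos < s.length := by
            by_contra hge
            rw [List.drop_eq_nil_of_le (by omega)] at hpref
            exact hs (List.prefix_nil.mp hpref)
          have hstep : 1 ≤ second.length := List.length_pos_of_ne_nil hs
          rw [specGo_copy first second tw pos s fuelA (by omega) hA
              (fun j hj => hnof j (by omega)) hmin]
          obtain ⟨g, hg⟩ : ∃ g, fuelA - pos = g + 1 := ⟨fuelA - pos - 1, by omega⟩
          obtain ⟨c, rest, hcr⟩ : ∃ c rest, s.drop pos = c :: rest := by
            rcases List.exists_cons_of_ne_nil (List.ne_nil_of_length_pos (l := s.drop pos) (by rw [List.length_drop]; omega)) with ⟨c, rest, h⟩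
            exact ⟨c, rest, h⟩
          rw [hg, hcr, specGo, if_neg (fun hcon => hnof pos le_rfl (hcr ▸ hcon)),
              if_pos (hcr ▸ hpref), ← hcr, List.drop_drop]
          have hlen' : (s.drop (pos + second.length)).length ≤ n := by rw [List.length_drop]; omega
          have hq0 : (s.drop (pos + second.length)).length = s.length - (pos + second.length) := by rw [List.length_drop]
          have hq1 : (s.drop (pos + second.length)).length ≤ g := by omega
          have hq2 : (s.drop (pos + second.length)).length < fB := by omega
          rw [ih (s.drop (pos + second.length)) g fB hlen' hq1 hq2]
          simp [List.append_assoc]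

-- ===== VERDICT (by name: the statement is the Claim_ definition above) =====
theorem replace_skip_existing_py_spec : Claim_equal_replace_skip_existing_py := by
  intro text from_word to_word _ hpre
  unfold Spec_replace_skip_existing_py
  unfold replace_skip_existing_py replace_skip_existing_py_alt
  by_cases heq : from_word = to_word
  · rw [if_pos heq, if_pos heq]
  · rw [if_neg heq, if_neg heq]
    rcases hpre with h | ⟨hf, ht⟩
    · exact absurd h heq
    have hfl : from_word.toList ≠ [] := by
      intro hnil; exact hf (by rwa [← String.toList_eq_nil_iff])
    have htl : to_word.toList ≠ [] := by
      intro hnil; exact ht (by rwa [← String.toList_eq_nil_iff])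
    rw [pyAGo_eq_specGo text.toList from_word.toList to_word.toList text.toList.length 0,
        List.drop_zero]
    by_cases hlen : to_word.toList.length ≤ from_word.toList.length
    · rw [if_pos hlen, if_pos hlen,
          specGo_eq_pyBGo from_word.toList to_word.toList to_word.toList hfl htl
            text.toList.length text.toList text.toList.length (text.toList.length + 1)
            le_rfl le_rfl (by omega)]
    · rw [if_neg hlen, if_neg hlen,
          specGo_eq_pyBGo to_word.toList from_word.toList to_word.toList htl hfl
            text.toList.length text.toList text.toList.length (text.toList.length + 1)
            le_rfl le_rfl (by omega)]
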